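-- pv_equiv track=rewrite | github.com/EddiePerez38/IPThreatIntel | src/utils.py | map_to_tactics
-- ===== SOURCE A (Python) =====
-- def map_to_tactics(ip_info, reputation, ai_analysis):
--     """Map IP characteristics to MITRE ATT&CK TTPs"""
--     ttps = []
--
--     # Network scanning (T1595)
--     if any('scan' in report.get('details', '').lower() for report in reputation.get('reports', [])):
--         ttps.append({
--             "id": "T1595",
--             "name": "Active Scanning",
--             "url": "https://attack.mitre.org/techniques/T1595/",
--             "confidence": "Medium"
--         })
--
--     # Command and Control (T1071)
--     if any('c2' in report.get('details', '').lower() or 'command' in report.get('details', '').lower()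
--           for report in reputation.get('reports', [])) or 'command and control' in ai_analysis.lower():
--         ttps.append({
--             "id": "T1071",
--             "name": "Application Layer Protocol",
--             "url": "https://attack.mitre.org/techniques/T1071/",
--             "confidence": "Medium"
--         })
--
--     # Phishing (T1566)
--     if any('phish' in report.get('details', '').lower() for report in reputation.get('reports', [])) or 'phishing' in ai_analysis.lower():
--         ttps.append({
--             "id": "T1566",
--             "name": "Phishing",
--             "url": "https://attack.mitre.org/techniques/T1566/",
--             "confidence": "Medium"
--         })
--
--     # DDoS (T1498)
--     if any('ddos' in report.get('details', '').lower() or 'dos' in report.get('details', '').lower()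
--           for report in reputation.get('reports', [])) or 'denial of service' in ai_analysis.lower():
--         ttps.append({
--             "id": "T1498",
--             "name": "Network Denial of Service",
--             "url": "https://attack.mitre.org/techniques/T1498/",
--             "confidence": "Medium"
--         })
--
--     # Brute Force (T1110)
--     if any('brute' in report.get('details', '').lower() or 'bruteforce' in report.get('details', '').lower()
--           for report in reputation.get('reports', [])) or 'brute force' in ai_analysis.lower():
--         ttps.append({
--             "id": "T1110",
--             "name": "Brute Force",
--             "url": "https://attack.mitre.org/techniques/T1110/",
--             "confidence": "Medium"
--         })
--
--     return ttps
-- ===== SOURCE B (Python) =====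
-- # Single pass over reports: an inverted keyword->TTP index accumulates the set of
-- # matched TTP ids; a final pass over the TTP catalogue emits the dicts in order.
-- _DETAIL_KEYWORDS = (
--     ("scan", "T1595"), ("c2", "T1071"), ("command", "T1071"),
--     ("phish", "T1566"), ("ddos", "T1498"), ("dos", "T1498"),
--     ("brute", "T1110"), ("bruteforce", "T1110"),
-- )
-- _AI_KEYWORDS = (
--     ("command and control", "T1071"), ("phishing", "T1566"),
--     ("denial of service", "T1498"), ("brute force", "T1110"),
-- )
-- _TTPS = (
--     ("T1595", "Active Scanning"), ("T1071", "Application Layer Protocol"),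
--     ("T1566", "Phishing"), ("T1498", "Network Denial of Service"),
--     ("T1110", "Brute Force"),
-- )
--
-- def map_to_tactics(ip_info, reputation, ai_analysis):
--     """Map IP characteristics to MITRE ATT&CK TTPs (inverted-index version)."""
--     matched = set()
--     for report in reputation.get('reports', []):
--         details = report.get('details', '').lower()
--         for kw, tid in _DETAIL_KEYWORDS:
--             if kw in details:
--                 matched.add(tid)
--     ai = ai_analysis.lower()
--     for kw, tid in _AI_KEYWORDS:
--         if kw in ai:
--             matched.add(tid)
--     return [{"id": tid, "name": name,
--              "url": "https://attack.mitre.org/techniques/%s/" % tid,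
--              "confidence": "Medium"}
--             for tid, name in _TTPS if tid in matched]
-- ===== Notes on version B (the rewrite author's own statement) =====
-- stated objective: alternative
-- what changed: Inverts the control flow: instead of five separate scans of the reports list (one per TTP), B makes a single pass over the reports using a keyword-to-TTP inverted index, accumulating a set of matched TTP ids, then one pass over the AI text keywords, and finally emits the TTP dicts by filtering the catalogue against that set.
import Mathlib
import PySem

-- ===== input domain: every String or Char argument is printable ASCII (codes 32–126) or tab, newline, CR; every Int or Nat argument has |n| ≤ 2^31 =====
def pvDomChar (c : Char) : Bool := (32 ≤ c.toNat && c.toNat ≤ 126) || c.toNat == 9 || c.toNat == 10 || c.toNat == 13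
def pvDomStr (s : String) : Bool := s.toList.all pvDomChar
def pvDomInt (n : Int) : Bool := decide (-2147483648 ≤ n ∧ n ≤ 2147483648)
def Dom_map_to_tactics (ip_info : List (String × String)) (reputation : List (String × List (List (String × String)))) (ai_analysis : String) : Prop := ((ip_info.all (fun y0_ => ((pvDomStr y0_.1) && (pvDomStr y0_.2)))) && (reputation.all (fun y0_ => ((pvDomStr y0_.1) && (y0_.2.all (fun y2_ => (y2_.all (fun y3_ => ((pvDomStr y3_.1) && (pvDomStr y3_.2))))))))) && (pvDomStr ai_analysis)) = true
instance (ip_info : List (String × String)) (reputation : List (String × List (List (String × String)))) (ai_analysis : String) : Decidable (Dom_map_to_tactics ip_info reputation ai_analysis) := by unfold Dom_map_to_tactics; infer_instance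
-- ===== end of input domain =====

-- ===== PORT A =====
-- B replaces A's five separate scans of the reports list by one single pass that
-- accumulates a set of matched TTP ids via a keyword->TTP inverted index; objective: simpler.
def map_to_tactics (ip_info : List (String × String)) (reputation : List (String × List (List (String × String)))) (ai_analysis : String) : List (List (String × String)) :=
  let reports := PySem.Dict.getD ⟨reputation⟩ "reports" []
  let ttps : List (List (String × String)) := []
  let ttps := if reports.any (fun report => PySem.Str.isIn "scan" (PySem.Str.lower (PySem.Dict.getD ⟨report⟩ "details" ""))) then
      ttps ++ [[("id", "T1595"), ("name", "Active Scanning"), ("url", "https://attack.mitre.org/techniques/T1595/"), ("confidence", "Medium")]]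
    else ttps
  let ttps := if reports.any (fun report => PySem.Str.isIn "c2" (PySem.Str.lower (PySem.Dict.getD ⟨report⟩ "details" "")) || PySem.Str.isIn "command" (PySem.Str.lower (PySem.Dict.getD ⟨report⟩ "details" ""))) || PySem.Str.isIn "command and control" (PySem.Str.lower ai_analysis) then
      ttps ++ [[("id", "T1071"), ("name", "Application Layer Protocol"), ("url", "https://attack.mitre.org/techniques/T1071/"), ("confidence", "Medium")]]
    else ttps
  let ttps := if reports.any (fun report => PySem.Str.isIn "phish" (PySem.Str.lower (PySem.Dict.getD ⟨report⟩ "details" ""))) || PySem.Str.isIn "phishing" (PySem.Str.lower ai_analysis) then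
      ttps ++ [[("id", "T1566"), ("name", "Phishing"), ("url", "https://attack.mitre.org/techniques/T1566/"), ("confidence", "Medium")]]
    else ttps
  let ttps := if reports.any (fun report => PySem.Str.isIn "ddos" (PySem.Str.lower (PySem.Dict.getD ⟨report⟩ "details" "")) || PySem.Str.isIn "dos" (PySem.Str.lower (PySem.Dict.getD ⟨report⟩ "details" ""))) || PySem.Str.isIn "denial of service" (PySem.Str.lower ai_analysis) then
      ttps ++ [[("id", "T1498"), ("name", "Network Denial of Service"), ("url", "https://attack.mitre.org/techniques/T1498/"), ("confidence", "Medium")]]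
    else ttps
  let ttps := if reports.any (fun report => PySem.Str.isIn "brute" (PySem.Str.lower (PySem.Dict.getD ⟨report⟩ "details" "")) || PySem.Str.isIn "bruteforce" (PySem.Str.lower (PySem.Dict.getD ⟨report⟩ "details" ""))) || PySem.Str.isIn "brute force" (PySem.Str.lower ai_analysis) then
      ttps ++ [[("id", "T1110"), ("name", "Brute Force"), ("url", "https://attack.mitre.org/techniques/T1110/"), ("confidence", "Medium")]]
    else ttps
  ttps

-- ===== PORT B =====
-- inverted index: report-detail keyword -> TTP id
def pvDetailKw : List (String × String) :=
  [("scan", "T1595"), ("c2", "T1071"), ("command", "T1071"),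
   ("phish", "T1566"), ("ddos", "T1498"), ("dos", "T1498"),
   ("brute", "T1110"), ("bruteforce", "T1110")]
-- AI-analysis keyword -> TTP id
def pvAiKw : List (String × String) :=
  [("command and control", "T1071"), ("phishing", "T1566"),
   ("denial of service", "T1498"), ("brute force", "T1110")]
-- the TTP catalogue, in emission order
def pvTtps : List (String × String) :=
  [("T1595", "Active Scanning"), ("T1071", "Application Layer Protocol"),
   ("T1566", "Phishing"), ("T1498", "Network Denial of Service"),
   ("T1110", "Brute Force")]

def map_to_tactics_alt (ip_info : List (String × String)) (reputation : List (String × List (List (String × String)))) (ai_analysis : String) : List (List (String × String)) :=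
  let matched : PySem.Set String :=
    (PySem.Dict.getD ⟨reputation⟩ "reports" []).foldl (fun matched report =>
      let details := PySem.Str.lower (PySem.Dict.getD ⟨report⟩ "details" "")
      pvDetailKw.foldl (fun m kv => if PySem.Str.isIn kv.1 details then PySem.Set.add m kv.2 else m) matched)
      PySem.Set.empty
  let ai := PySem.Str.lower ai_analysis
  let matched := pvAiKw.foldl (fun m kv => if PySem.Str.isIn kv.1 ai then PySem.Set.add m kv.2 else m) matched
  (pvTtps.filter (fun t => PySem.Set.contains matched t.1)).map (fun t =>
    [("id", t.1), ("name", t.2),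
     ("url", "https://attack.mitre.org/techniques/" ++ t.1 ++ "/"),
     ("confidence", "Medium")])

-- ===== PRECONDITION & SPEC =====
def Spec_map_to_tactics (ip_info : List (String × String)) (reputation : List (String × List (List (String × String)))) (ai_analysis : String) (out : List (List (String × String))) : Prop := out = map_to_tactics_alt ip_info reputation ai_analysis
instance (ip_info : List (String × String)) (reputation : List (String × List (List (String × String)))) (ai_analysis : String) (out : List (List (String × String))) : Decidable (Spec_map_to_tactics ip_info reputation ai_analysis out) := by unfold Spec_map_to_tactics; infer_instance

-- ===== CLAIM =====
def Claim_equal_map_to_tactics : Prop := ∀ (ip_info : List (String × String)) (reputation : List (String × List (List (String × String)))) (ai_analysis : String), Dom_map_to_tactics ip_info reputation ai_analysis → Spec_map_to_tactics ip_info reputation ai_analysis (map_to_tactics ip_info reputation ai_analysis)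

-- ===== LEMMAS AND PROOFS =====

-- membership in a conditional-add fold
theorem mem_foldl_ite_add {α β : Type} [BEq α] [LawfulBEq α] (l : List β) (c : β → Bool) (f : β → α) (m : PySem.Set α) (x : α) :
    x ∈ l.foldl (fun m b => if c b then PySem.Set.add m (f b) else m) m ↔ x ∈ m ∨ ∃ b ∈ l, c b ∧ f b = x := by
  induction l generalizing m with
  | nil => simp
  | cons b l ih =>
    simp only [List.foldl_cons, List.mem_cons]
    by_cases hb : c b
    · simp only [if_pos hb, ih, PySem.Set.mem_add]
      constructor
      · rintro ((h | h) | ⟨y, hy, hc, hf⟩)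
        · exact Or.inl h
        · exact Or.inr ⟨b, Or.inl rfl, hb, h.symm⟩
        · exact Or.inr ⟨y, Or.inr hy, hc, hf⟩
      · rintro (h | ⟨y, (rfl | hy), hc, hf⟩)
        · exact Or.inl (Or.inl h)
        · exact Or.inl (Or.inr hf.symm)
        · exact Or.inr ⟨y, hy, hc, hf⟩
    · simp only [if_neg hb, ih]
      constructor
      · rintro (h | ⟨y, hy, hc, hf⟩)
        · exact Or.inl h
        · exact Or.inr ⟨y, Or.inr hy, hc, hf⟩
      · rintro (h | ⟨y, (rfl | hy), hc, hf⟩)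
        · exact Or.inl h
        · exact absurd hc (by simp [hb])
        · exact Or.inr ⟨y, hy, hc, hf⟩

-- membership in the inner keyword fold, for a fixed details string
theorem mem_detail_fold (D : String) (m : PySem.Set String) (x : String) :
    x ∈ pvDetailKw.foldl (fun m kv => if PySem.Str.isIn kv.1 D then PySem.Set.add m kv.2 else m) m ↔
      x ∈ m ∨ ∃ kv ∈ pvDetailKw, PySem.Str.isIn kv.1 D ∧ kv.2 = x :=
  mem_foldl_ite_add pvDetailKw (fun kv => PySem.Str.isIn kv.1 D) (fun kv => kv.2) m x

-- membership in the nested reports fold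
theorem mem_reports_fold (reports : List (List (String × String))) (m : PySem.Set String) (x : String) :
    x ∈ reports.foldl (fun matched report =>
        pvDetailKw.foldl (fun m kv => if PySem.Str.isIn kv.1 (PySem.Str.lower (PySem.Dict.getD ⟨report⟩ "details" "")) then PySem.Set.add m kv.2 else m) matched) m
    ↔ x ∈ m ∨ ∃ r ∈ reports, ∃ kv ∈ pvDetailKw, PySem.Str.isIn kv.1 (PySem.Str.lower (PySem.Dict.getD ⟨r⟩ "details" "")) ∧ kv.2 = x := by
  induction reports generalizing m with
  | nil => simp
  | cons r rs ih =>
    simp only [List.foldl_cons, List.mem_cons, ih, mem_detail_fold]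
    constructor
    · rintro ((h | hkv) | ⟨r', hr', hrest⟩)
      · exact Or.inl h
      · exact Or.inr ⟨r, Or.inl rfl, hkv⟩
      · exact Or.inr ⟨r', Or.inr hr', hrest⟩
    · rintro (h | ⟨r', (rfl | hr'), hrest⟩)
      · exact Or.inl (Or.inl h)
      · exact Or.inl (Or.inr hrest)
      · exact Or.inr ⟨r', hr', hrest⟩

-- ===== VERDICT =====
theorem map_to_tactics_spec : Claim_equal_map_to_tactics := by
  intro ip_info reputation ai_analysis _
  unfold Spec_map_to_tactics
  simp only [map_to_tactics, map_to_tactics_alt]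
  set reports := PySem.Dict.getD (⟨reputation⟩ : PySem.Dict String (List (List (String × String)))) "reports" [] with hreports
  set ai := PySem.Str.lower ai_analysis with hai
  set matched := pvAiKw.foldl (fun m kv => if PySem.Str.isIn kv.1 ai then PySem.Set.add m kv.2 else m)
      (reports.foldl (fun matched report =>
        pvDetailKw.foldl (fun m kv => if PySem.Str.isIn kv.1 (PySem.Str.lower (PySem.Dict.getD ⟨report⟩ "details" "")) then PySem.Set.add m kv.2 else m) matched)
        PySem.Set.empty) with hmatched
  have hmem : ∀ x : String, x ∈ matched ↔
      (∃ r ∈ reports, ∃ kv ∈ pvDetailKw, PySem.Str.isIn kv.1 (PySem.Str.lower (PySem.Dict.getD ⟨r⟩ "details" "")) ∧ kv.2 = x)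
      ∨ ∃ kv ∈ pvAiKw, PySem.Str.isIn kv.1 ai ∧ kv.2 = x := by
    intro x
    rw [hmatched, mem_foldl_ite_add pvAiKw (fun kv => PySem.Str.isIn kv.1 ai) (fun kv => kv.2),
        mem_reports_fold]
    simp [PySem.Set.empty]
  have hcon : ∀ x : String, PySem.Set.contains matched x = true ↔
      (∃ r ∈ reports, ∃ kv ∈ pvDetailKw, PySem.Str.isIn kv.1 (PySem.Str.lower (PySem.Dict.getD ⟨r⟩ "details" "")) ∧ kv.2 = x)
      ∨ ∃ kv ∈ pvAiKw, PySem.Str.isIn kv.1 ai ∧ kv.2 = x := by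
    intro x; rw [PySem.Set.contains_iff]; exact hmem x
  have h1 : PySem.Set.contains matched "T1595" =
      reports.any (fun report => PySem.Str.isIn "scan" (PySem.Str.lower (PySem.Dict.getD ⟨report⟩ "details" ""))) := by
    rw [Bool.eq_iff_iff, hcon, List.any_eq_true]
    simp [pvDetailKw, pvAiKw]
  have h2 : PySem.Set.contains matched "T1071" =
      (reports.any (fun report => PySem.Str.isIn "c2" (PySem.Str.lower (PySem.Dict.getD ⟨report⟩ "details" "")) || PySem.Str.isIn "command" (PySem.Str.lower (PySem.Dict.getD ⟨report⟩ "details" ""))) || PySem.Str.isIn "command and control" ai) := by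
    rw [Bool.eq_iff_iff, hcon]
    simp only [pvDetailKw, pvAiKw, Bool.or_eq_true, List.any_eq_true, Bool.or_eq_true]
    simp
  have h3 : PySem.Set.contains matched "T1566" =
      (reports.any (fun report => PySem.Str.isIn "phish" (PySem.Str.lower (PySem.Dict.getD ⟨report⟩ "details" ""))) || PySem.Str.isIn "phishing" ai) := by
    rw [Bool.eq_iff_iff, hcon]
    simp [pvDetailKw, pvAiKw, List.any_eq_true]
  have h4 : PySem.Set.contains matched "T1498" =
      (reports.any (fun report => PySem.Str.isIn "ddos" (PySem.Str.lower (PySem.Dict.getD ⟨report⟩ "details" "")) || PySem.Str.isIn "dos" (PySem.Str.lower (PySem.Dict.getD ⟨report⟩ "details" ""))) || PySem.Str.isIn "denial of service" ai) := by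
    rw [Bool.eq_iff_iff, hcon]
    simp only [pvDetailKw, pvAiKw, Bool.or_eq_true, List.any_eq_true, Bool.or_eq_true]
    simp
  have h5 : PySem.Set.contains matched "T1110" =
      (reports.any (fun report => PySem.Str.isIn "brute" (PySem.Str.lower (PySem.Dict.getD ⟨report⟩ "details" "")) || PySem.Str.isIn "bruteforce" (PySem.Str.lower (PySem.Dict.getD ⟨report⟩ "details" ""))) || PySem.Str.isIn "brute force" ai) := by
    rw [Bool.eq_iff_iff, hcon]
    simp only [pvDetailKw, pvAiKw, Bool.or_eq_true, List.any_eq_true, Bool.or_eq_true]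
    simp
  simp only [pvTtps, List.filter_cons, List.filter_nil, h1, h2, h3, h4, h5]
  generalize reports.any (fun report => PySem.Str.isIn "scan" (PySem.Str.lower (PySem.Dict.getD ⟨report⟩ "details" ""))) = b1
  generalize (reports.any (fun report => PySem.Str.isIn "c2" (PySem.Str.lower (PySem.Dict.getD ⟨report⟩ "details" "")) || PySem.Str.isIn "command" (PySem.Str.lower (PySem.Dict.getD ⟨report⟩ "details" ""))) || PySem.Str.isIn "command and control" ai) = b2
  generalize (reports.any (fun report => PySem.Str.isIn "phish" (PySem.Str.lower (PySem.Dict.getD ⟨report⟩ "details" ""))) || PySem.Str.isIn "phishing" ai) = b3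
  generalize (reports.any (fun report => PySem.Str.isIn "ddos" (PySem.Str.lower (PySem.Dict.getD ⟨report⟩ "details" "")) || PySem.Str.isIn "dos" (PySem.Str.lower (PySem.Dict.getD ⟨report⟩ "details" ""))) || PySem.Str.isIn "denial of service" ai) = b4
  generalize (reports.any (fun report => PySem.Str.isIn "brute" (PySem.Str.lower (PySem.Dict.getD ⟨report⟩ "details" "")) || PySem.Str.isIn "bruteforce" (PySem.Str.lower (PySem.Dict.getD ⟨report⟩ "details" ""))) || PySem.Str.isIn "brute force" ai) = b5
  cases b1 <;> cases b2 <;> cases b3 <;> cases b4 <;> cases b5 <;> decide
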